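-- pv_equiv track=rewrite | github.com/Ritvik19/CodeBook | data/Algorithms/Brute Force String Matching.py | bruteForceStringMatching
-- ===== SOURCE A (Python) =====
-- def bruteForceStringMatching(string, pattern):
--     n = len(string)
--     m = len(pattern)
--     if not pattern:
--         return 0
--     for i in range(n-m+1):
--         si = i
--         pi = 0
--         while si < n and pi < m and string[si] == pattern[pi]:
--             si += 1
--             pi += 1
--         if pi == m:
--             return i
--     return -1
-- ===== SOURCE B (Python) =====
-- def bruteForceStringMatching(string, pattern):
--     return string.find(pattern)
-- ===== Notes on version B (the rewrite author's own statement) =====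
-- stated objective: idiomatic
-- what changed: Replaced the hand-written nested index/while brute-force scan with Python's built-in str.find, which returns the same first-occurrence index (and 0 for the empty pattern) via CPython's optimized C substring search.
import Mathlib
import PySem

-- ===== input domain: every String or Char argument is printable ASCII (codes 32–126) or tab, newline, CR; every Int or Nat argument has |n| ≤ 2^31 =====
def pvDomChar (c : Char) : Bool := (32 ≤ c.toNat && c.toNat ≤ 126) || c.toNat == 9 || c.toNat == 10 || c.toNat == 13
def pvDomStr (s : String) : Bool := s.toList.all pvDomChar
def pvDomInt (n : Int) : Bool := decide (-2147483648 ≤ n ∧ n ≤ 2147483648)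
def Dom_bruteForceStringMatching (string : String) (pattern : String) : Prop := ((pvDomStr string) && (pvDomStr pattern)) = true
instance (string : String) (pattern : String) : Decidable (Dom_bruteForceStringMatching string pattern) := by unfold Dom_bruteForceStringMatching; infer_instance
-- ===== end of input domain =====

-- ===== PORT A =====
-- B replaces A's hand-written nested brute-force scan with the library first-occurrence search (idiomatic; return value only).

-- inner while loop of A: 'while si < n and pi < m and string[si] == pattern[pi]: si += 1; pi += 1', returns final pi
def pvInnerWhile (s p : List Char) (n m : Int) (si pi : Int) : Int :=
  if h : si < n ∧ pi < m ∧ PySem.List.pyGet? s si = PySem.List.pyGet? p pi then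
    pvInnerWhile s p n m (si + 1) (pi + 1)
  else pi
termination_by (m - pi).toNat
decreasing_by omega

-- outer 'for i in range(n-m+1): … if pi == m: return i' / fall-through 'return -1'
def pvOuterFor (s p : List Char) (n m : Int) : List Int → Int
  | [] => -1
  | i :: rest => if pvInnerWhile s p n m i 0 = m then i else pvOuterFor s p n m rest

def bruteForceStringMatching (string : String) (pattern : String) : Int :=
  let s := string.toList
  let p := pattern.toList
  let n : Int := s.length
  let m : Int := p.length
  if p = [] then 0
  else pvOuterFor s p n m (PySem.List.pyRange 0 (n - m + 1) 1)

-- ===== PORT B =====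
def bruteForceStringMatching_alt (string : String) (pattern : String) : Int :=
  PySem.Str.find string pattern

-- ===== PRECONDITION & SPEC =====
def Spec_bruteForceStringMatching (string : String) (pattern : String) (out : Int) : Prop := out = bruteForceStringMatching_alt string pattern
instance (string : String) (pattern : String) (out : Int) : Decidable (Spec_bruteForceStringMatching string pattern out) := by unfold Spec_bruteForceStringMatching; infer_instance

-- ===== CLAIM (what is proved, stated in full; the proofs are below) =====
def Claim_equal_bruteForceStringMatching : Prop := ∀ (string : String) (pattern : String), Dom_bruteForceStringMatching string pattern → Spec_bruteForceStringMatching string pattern (bruteForceStringMatching string pattern)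

-- ===== LEMMAS AND PROOFS =====

-- the inner while loop reaches pi = m exactly when the rest of the pattern is a prefix of the rest of the string
lemma pvInnerWhile_eq_iff (s p : List Char) (si pi : Nat) (h : pi ≤ p.length) :
    pvInnerWhile s p (s.length : Int) (p.length : Int) (si : Int) (pi : Int) = (p.length : Int)
      ↔ p.drop pi <+: s.drop si := by
  induction hn : p.length - pi generalizing si pi with
  | zero =>
    have hpi : pi = p.length := by omega
    rw [pvInnerWhile]
    simp [hpi]
  | succ k ih =>
    have hpi : pi < p.length := by omega
    rw [pvInnerWhile]
    by_cases hc : (si : Int) < (s.length : Int) ∧ (pi : Int) < (p.length : Int) ∧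
        PySem.List.pyGet? s (si : Int) = PySem.List.pyGet? p (pi : Int)
    · have hsi : si < s.length := by exact_mod_cast hc.1
      have heq : s[si] = p[pi] := by
        have := hc.2.2
        simp [ hsi, hpi] at this
        exact this
      have hdrops : s.drop si = s[si] :: s.drop (si + 1) := List.drop_eq_getElem_cons hsi
      have hdropp : p.drop pi = p[pi] :: p.drop (pi + 1) := List.drop_eq_getElem_cons hpi
      rw [dif_pos hc]
      have : pvInnerWhile s p (s.length : Int) (p.length : Int) ((si : Int) + 1) ((pi : Int) + 1)
          = pvInnerWhile s p (s.length : Int) (p.length : Int) ((si + 1 : Nat) : Int) ((pi + 1 : Nat) : Int) := by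
        push_cast; ring_nf
      rw [this, ih (si + 1) (pi + 1) (by omega) (by omega)]
      rw [hdrops, hdropp, heq]
      constructor
      · intro hpre; exact List.cons_prefix_cons.mpr ⟨rfl, hpre⟩
      · intro hpre; exact (List.cons_prefix_cons.mp hpre).2
    · rw [dif_neg hc]
      constructor
      · intro hv; exfalso; omega
      · intro hpre; exfalso
        have hdropp : p.drop pi = p[pi] :: p.drop (pi + 1) := List.drop_eq_getElem_cons hpi
        by_cases hsi : si < s.length
        · have hdrops : s.drop si = s[si] :: s.drop (si + 1) := List.drop_eq_getElem_cons hsi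
          rw [hdropp, hdrops] at hpre
          have heq := (List.cons_prefix_cons.mp hpre).1
          apply hc
          refine ⟨by exact_mod_cast hsi, by exact_mod_cast hpi, ?_⟩
          simp [ hsi, hpi, heq]
        · have : s.drop si = [] := List.drop_eq_nil_of_le (by omega)
          rw [this, hdropp] at hpre
          simp at hpre; omega

-- if the pattern occurs nowhere, the outer loop falls through to -1
lemma pvOuterFor_none (s p : List Char) (hall : ∀ j : Nat, ¬ p <+: s.drop j) :
    ∀ l : List Int, (∀ i ∈ l, 0 ≤ i) → pvOuterFor s p (s.length : Int) (p.length : Int) l = -1 := by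
  intro l
  induction l with
  | nil => intro _; rfl
  | cons i rest ih =>
    intro hpos
    have hi : 0 ≤ i := hpos i (by simp)
    have hcast : i = ((i.toNat : Nat) : Int) := by omega
    rw [pvOuterFor]
    have hne : pvInnerWhile s p (s.length : Int) (p.length : Int) i 0 ≠ (p.length : Int) := by
      rw [hcast]
      have h0 : ((0 : Nat) : Int) = (0 : Int) := rfl
      rw [← h0]
      intro hv
      exact hall i.toNat (by simpa using (pvInnerWhile_eq_iff s p i.toNat 0 (by omega)).mp hv)
    rw [if_neg hne]
    exact ih (fun j hj => hpos j (by simp [hj]))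

-- if the first occurrence is at index f, scanning from any k ≤ f returns f
lemma pvOuterFor_first (s p : List Char) (f b : Int)
    (hf : 0 ≤ f) (hfb : f < b)
    (hpre : p <+: s.drop f.toNat) (hmin : ∀ i : Nat, i < f.toNat → ¬ p <+: s.drop i) :
    ∀ k : Int, 0 ≤ k → k ≤ f →
      pvOuterFor s p (s.length : Int) (p.length : Int) (PySem.List.pyRange k b 1) = f := by
  intro k hk0 hkf
  induction hd : (f - k).toNat generalizing k with
  | zero =>
    have hkf' : k = f := by omega
    subst hkf'
    rw [PySem.List.pyRange_one_cons (by omega), pvOuterFor]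
    have hcast : k = ((k.toNat : Nat) : Int) := by omega
    have hv : pvInnerWhile s p (s.length : Int) (p.length : Int) k 0 = (p.length : Int) := by
      rw [hcast]
      have h0 : ((0 : Nat) : Int) = (0 : Int) := rfl
      rw [← h0]
      exact (pvInnerWhile_eq_iff s p k.toNat 0 (by omega)).mpr (by simpa using hpre)
    rw [if_pos hv]
  | succ d ih =>
    have hkf' : k < f := by omega
    rw [PySem.List.pyRange_one_cons (by omega), pvOuterFor]
    have hne : pvInnerWhile s p (s.length : Int) (p.length : Int) k 0 ≠ (p.length : Int) := by
      have hcast : k = ((k.toNat : Nat) : Int) := by omega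
      rw [hcast]
      have h0 : ((0 : Nat) : Int) = (0 : Int) := rfl
      rw [← h0]
      intro hv
      exact hmin k.toNat (by omega) (by simpa using (pvInnerWhile_eq_iff s p k.toNat 0 (by omega)).mp hv)
    rw [if_neg hne]
    exact ih (k + 1) (by omega) (by omega) (by omega)

-- ===== VERDICT (by name: the statement is the Claim_ definition above) =====
theorem bruteForceStringMatching_spec : Claim_equal_bruteForceStringMatching := by
  intro string pattern _
  unfold Spec_bruteForceStringMatching bruteForceStringMatching bruteForceStringMatching_alt
  simp only [PySem.Str.find_eq]
  set s := string.toList with hs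
  set p := pattern.toList with hp
  by_cases hpe : p = []
  · simp [hpe, PySem.Chars.find_nil]
  · rw [if_neg hpe]
    set F := PySem.Chars.find s p with hF
    by_cases hneg : F = -1
    · rw [hneg]
      have hninf : ¬ p <:+: s := (PySem.Chars.find_eq_neg_one_iff s p).mp hneg
      have hall : ∀ j : Nat, ¬ p <+: s.drop j := by
        intro j hj
        exact hninf ((PySem.Chars.isIn_iff_infix p s).mp
          ((PySem.Chars.exists_prefix_drop_iff_isIn p s).mp ⟨j, hj⟩))
      exact pvOuterFor_none s p hall _ (fun i hi => (PySem.List.mem_pyRange_one.mp hi).1)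
    · have hf0 : 0 ≤ F := by have := PySem.Chars.neg_one_le_find s p; omega
      obtain ⟨hpre, hmin⟩ := PySem.Chars.find_spec hf0
      have hlen : p.length ≤ (s.drop F.toNat).length := hpre.length_le
      have hfb : F < (s.length : Int) - (p.length : Int) + 1 := by
        simp [List.length_drop] at hlen
        have hFle : F ≤ (s.length : Int) := PySem.Chars.find_le_length s p
        omega
      exact pvOuterFor_first s p F _ hf0 hfb hpre hmin 0 le_rfl hf0
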